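-- pv_equiv track=rewrite | github.com/PBrus/interactive-diagrams | idgrms/data.py | current_data_indexes
-- ===== SOURCE A (Python) =====
-- def current_data_indexes(data, two_columns_argument):
--     first_index = -1
--     second_index = -1
--
--     for index, column_data in enumerate(data):
--         if two_columns_argument[0] == column_data[0]:
--             first_index = index
--         if two_columns_argument[1] == column_data[0]:
--             second_index = index
--
--     return first_index, second_index
-- ===== SOURCE B (Python) =====
-- def current_data_indexes(data, two_columns_argument):
--     first_index = -1
--     second_index = -1
--
--     for index in range(len(data) - 1, -1, -1):
--         value = data[index][0]
--         if first_index == -1 and value == two_columns_argument[0]: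
--             first_index = index
--         if second_index == -1 and value == two_columns_argument[1]:
--             second_index = index
--         if first_index != -1 and second_index != -1:
--             break
--
--     return first_index, second_index
-- ===== Notes on version B (the rewrite author's own statement) =====
-- stated objective: alternative
-- what changed: Replaces A's forward scan that overwrites both slots until the end with a reverse index scan that assigns each slot only on its first hit from the back (the last occurrence) and breaks early once both are found.
import Mathlib
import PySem

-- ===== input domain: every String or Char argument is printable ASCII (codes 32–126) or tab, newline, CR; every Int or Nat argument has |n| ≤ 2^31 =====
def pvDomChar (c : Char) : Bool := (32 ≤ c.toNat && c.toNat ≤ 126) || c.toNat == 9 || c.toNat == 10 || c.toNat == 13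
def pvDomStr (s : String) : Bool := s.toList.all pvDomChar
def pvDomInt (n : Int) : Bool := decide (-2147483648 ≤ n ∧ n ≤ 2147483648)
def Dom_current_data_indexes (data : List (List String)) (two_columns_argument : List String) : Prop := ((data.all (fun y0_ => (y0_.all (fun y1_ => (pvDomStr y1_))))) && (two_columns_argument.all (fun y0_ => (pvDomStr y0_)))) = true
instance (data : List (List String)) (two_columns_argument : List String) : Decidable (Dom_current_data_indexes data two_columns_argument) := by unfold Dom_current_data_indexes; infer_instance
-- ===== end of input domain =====

-- B replaces A's forward overwrite-until-end scan with a reverse index scan that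
-- assigns each slot only on its first hit from the back and breaks once both are found
-- (alternative decomposition, same asymptotic cost).

-- ===== PORT A =====
def current_data_indexes (data : List (List String)) (two_columns_argument : List String) : Int × Int :=
  ((PySem.List.enumerate data 0).foldl
    (fun (st : Int × Int) (p : Int × List String) =>
      let fi := if PySem.List.pyGetD two_columns_argument 0 "" == PySem.List.pyGetD p.2 0 "" then p.1 else st.1
      let si := if PySem.List.pyGetD two_columns_argument 1 "" == PySem.List.pyGetD p.2 0 "" then p.1 else st.2
      (fi, si))
    ((-1 : Int), (-1 : Int)))

-- ===== PORT B =====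
-- the for-loop over range(len(data)-1, -1, -1) with its break, as a recursion over the index list
def altGo (data : List (List String)) (two_columns_argument : List String) : List Int → Int × Int → Int × Int
  | [], st => st
  | i :: rest, st =>
    let v := PySem.List.pyGetD (PySem.List.pyGetD data i []) 0 ""
    let fi := if st.1 == -1 && v == PySem.List.pyGetD two_columns_argument 0 "" then i else st.1
    let si := if st.2 == -1 && v == PySem.List.pyGetD two_columns_argument 1 "" then i else st.2
    if fi != -1 && si != -1 then (fi, si)
    else altGo data two_columns_argument rest (fi, si)

def current_data_indexes_alt (data : List (List String)) (two_columns_argument : List String) : Int × Int :=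
  altGo data two_columns_argument
    (PySem.List.pyRange ((data.length : Int) - 1) (-1) (-1)) ((-1 : Int), (-1 : Int))

-- ===== PRECONDITION & SPEC =====
-- Pre_ excludes exactly the inputs on which Python A raises IndexError:
-- a nonempty data with fewer than two targets, or containing an empty row.
def Pre_current_data_indexes (data : List (List String)) (two_columns_argument : List String) : Prop :=
  data = [] ∨ (2 ≤ two_columns_argument.length ∧ ∀ row ∈ data, row ≠ [])
instance (data : List (List String)) (two_columns_argument : List String) : Decidable (Pre_current_data_indexes data two_columns_argument) := by unfold Pre_current_data_indexes; infer_instance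

def pvWitness_current_data_indexes : List (List String) × List String :=
  ([["a"], ["b"], ["a"]], ["a", "b"])

def Spec_current_data_indexes (data : List (List String)) (two_columns_argument : List String) (out : Int × Int) : Prop := out = current_data_indexes_alt data two_columns_argument
instance (data : List (List String)) (two_columns_argument : List String) (out : Int × Int) : Decidable (Spec_current_data_indexes data two_columns_argument out) := by unfold Spec_current_data_indexes; infer_instance

-- ===== CLAIM (what is proved, stated in full; the proofs are below) =====
def Claim_equal_current_data_indexes : Prop := ∀ (data : List (List String)) (two_columns_argument : List String), Dom_current_data_indexes data two_columns_argument → Pre_current_data_indexes data two_columns_argument → Spec_current_data_indexes data two_columns_argument (current_data_indexes data two_columns_argument)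

-- ===== LEMMAS AND PROOFS =====

-- last index (from start offset i) whose head equals t, else acc
def lmGo (t : String) : List (List String) → Int → Int → Int
  | [], _, acc => acc
  | r :: rs, i, acc => lmGo t rs (i + 1) (if t == PySem.List.pyGetD r 0 "" then i else acc)

theorem lmGo_append (t : String) (ds : List (List String)) (r : List String) :
    ∀ (i acc : Int), lmGo t (ds ++ [r]) i acc =
      if t == PySem.List.pyGetD r 0 "" then i + ds.length else lmGo t ds i acc := by
  induction ds with
  | nil => intro i acc; simp [lmGo]
  | cons d ds ih =>
      intro i acc
      simp only [List.cons_append, lmGo, ih, List.length_cons]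
      split <;> [push_cast; skip] <;> ring_nf

theorem A_fold (two : List String) (rows : List (List String)) :
    ∀ (s a b : Int),
      (PySem.List.enumerate rows s).foldl
        (fun (st : Int × Int) (p : Int × List String) =>
          let fi := if PySem.List.pyGetD two 0 "" == PySem.List.pyGetD p.2 0 "" then p.1 else st.1
          let si := if PySem.List.pyGetD two 1 "" == PySem.List.pyGetD p.2 0 "" then p.1 else st.2
          (fi, si)) (a, b)
      = (lmGo (PySem.List.pyGetD two 0 "") rows s a, lmGo (PySem.List.pyGetD two 1 "") rows s b) := by
  induction rows with
  | nil => intro s a b; simp [PySem.List.enumerate_nil, lmGo]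
  | cons r rs ih => intro s a b; simp only [PySem.List.enumerate_cons, List.foldl_cons, lmGo, ih]

theorem altGo_append_irrel (ds : List (List String)) (r : List String) (two : List String) :
    ∀ (l : List Int), (∀ i ∈ l, 0 ≤ i ∧ i < (ds.length : Int)) →
      ∀ st, altGo (ds ++ [r]) two l st = altGo ds two l st := by
  intro l
  induction l with
  | nil => intro _ st; rfl
  | cons i rest ih =>
      intro h st
      have hi := h i (List.mem_cons_self)
      have hrow : PySem.List.pyGetD (ds ++ [r]) i ([] : List String) = PySem.List.pyGetD ds i [] := by
        rw [PySem.List.pyGetD_eq_getElem (ds ++ [r]) ([] : List String) hi.1 (by simp; omega),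
            PySem.List.pyGetD_eq_getElem ds ([] : List String) hi.1 (by simpa using hi.2)]
        exact List.getElem_append_left _
      have ih' := ih (fun j hj => h j (List.mem_cons_of_mem _ hj))
      simp only [altGo, hrow, ih']

set_option maxRecDepth 4000 in
set_option maxHeartbeats 1600000 in
theorem altGo_inv (two : List String) (rows : List (List String)) :
    ∀ st : Int × Int,
      altGo rows two (PySem.List.pyRange ((rows.length : Int) - 1) (-1) (-1)) st =
        ( if st.1 = -1 then lmGo (PySem.List.pyGetD two 0 "") rows 0 (-1) else st.1,
          if st.2 = -1 then lmGo (PySem.List.pyGetD two 1 "") rows 0 (-1) else st.2 ) := by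
  induction rows using List.reverseRecOn with
  | nil =>
      intro st
      rw [PySem.List.pyRange_neg_one_eq_nil (by simp)]
      obtain ⟨f, s⟩ := st
      simp only [altGo, lmGo]
      refine Prod.ext ?_ ?_ <;> (dsimp; split <;> simp_all)
  | append_singleton ds r ih =>
      intro st
      have hm : (0 : Int) ≤ (ds.length : Int) := by positivity
      have hlen : ((ds ++ [r]).length : Int) - 1 = (ds.length : Int) := by simp
      rw [hlen, PySem.List.pyRange_neg_one_cons (by omega)]
      have hrow : PySem.List.pyGetD (ds ++ [r]) (ds.length : Int) ([] : List String) = r := by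
        rw [PySem.List.pyGetD_eq_getElem (ds ++ [r]) ([] : List String) hm (by simp)]
        simp
      have hrest :
          ∀ st', altGo (ds ++ [r]) two (PySem.List.pyRange ((ds.length : Int) - 1) (-1) (-1)) st' =
            altGo ds two (PySem.List.pyRange ((ds.length : Int) - 1) (-1) (-1)) st' := by
        intro st'
        exact altGo_append_irrel ds r two _
          (fun i hi => by
            have := (PySem.List.mem_pyRange_neg_one).1 hi
            omega) st'
      simp only [altGo, hrow, hrest, ih]
      rw [lmGo_append, lmGo_append]
      have hm' : ((ds.length : Int)) ≠ -1 := by omega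
      rcases st with ⟨f, s⟩
      simp only [Bool.and_eq_true, beq_iff_eq, bne_iff_ne, ne_eq, zero_add]
      split_ifs <;> first | rfl | tauto

-- ===== VERDICT (by name: the statement is the Claim_ definition above) =====
theorem current_data_indexes_spec : Claim_equal_current_data_indexes := by
  intro data two _ _
  unfold Spec_current_data_indexes current_data_indexes current_data_indexes_alt
  rw [A_fold, altGo_inv]
  simp
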